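-- pv_equiv track=rewrite | github.com/AviadBag/blockwise-simple-perms-counter | main.py | set_to_comp
-- ===== SOURCE A (Python) =====
-- from typing import List
--
-- N = 23
--
-- def set_to_comp(s: List[int]) -> List[int]:
--     if len(s) == 0:
--         return [N]
--
--     comp = []
--
--     first = 0
--     second = s[0]
--     for i in range(len(s)):
--         comp.append(second - first)
--         first = second
--
--         try:
--             second = s[i + 1]
--         except IndexError:
--             comp.append(N - first)
--
--     return comp
-- ===== SOURCE B (Python) =====
-- from typing import List
--
-- N = 23
--
-- def _gaps(prev: int, xs: List[int], last: int) -> List[int]: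
--     # gaps of the boundary sequence prev, xs[0], ..., xs[-1], last, by divide and conquer
--     if not xs:
--         return [last - prev]
--     m = len(xs) // 2
--     return _gaps(prev, xs[:m], xs[m]) + _gaps(xs[m], xs[m + 1:], last)
--
-- def set_to_comp(s: List[int]) -> List[int]:
--     return _gaps(0, s, N)
-- ===== Notes on version B (the rewrite author's own statement) =====
-- stated objective: alternative
-- what changed: B computes the gaps by divide and conquer: it splits the list at its middle element and recursively concatenates the gaps of the two halves sharing that middle boundary, replacing A's left-to-right index loop with lookahead state and try/except IndexError.
import Mathlib
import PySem

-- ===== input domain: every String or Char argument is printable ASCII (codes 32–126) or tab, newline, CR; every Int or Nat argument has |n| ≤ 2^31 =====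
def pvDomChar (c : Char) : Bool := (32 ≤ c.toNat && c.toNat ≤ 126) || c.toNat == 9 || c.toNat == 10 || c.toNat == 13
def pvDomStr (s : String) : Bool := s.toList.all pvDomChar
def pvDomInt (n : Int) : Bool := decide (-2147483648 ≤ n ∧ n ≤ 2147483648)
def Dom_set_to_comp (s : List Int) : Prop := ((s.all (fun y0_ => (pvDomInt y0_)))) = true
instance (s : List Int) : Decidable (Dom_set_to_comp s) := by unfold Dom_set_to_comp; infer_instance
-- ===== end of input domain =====

-- B computes the gaps by divide and conquer on the list, splitting at the middle element
-- (objective: alternative); equal return value on all inputs.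

-- ===== PORT A =====
-- the body of A's `for i in range(len(s))` loop; state = (comp, first, second)
def pvStepA (s : List Int) (st : List Int × Int × Int) (i : Int) : List Int × Int × Int :=
  let comp := st.1 ++ [st.2.2 - st.2.1]
  let first := st.2.2
  match PySem.List.pyGet? s (i + 1) with
  | some v => (comp, first, v)
  | none => (comp ++ [23 - first], first, st.2.2)

def set_to_comp (s : List Int) : List Int :=
  if s.length = 0 then [23]
  else
    ((PySem.List.pyRange 0 (s.length : Int) 1).foldl (pvStepA s) ([], 0, s.headI)).1

-- ===== PORT B =====
-- _gaps in Source B: divide and conquer; xs[m] is in range since xs is nonempty, so getD is exact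
def pvGapsDnC (prev : Int) (xs : List Int) (last : Int) : List Int :=
  if xs.length = 0 then [last - prev]
  else
    let m := xs.length / 2
    pvGapsDnC prev (xs.take m) (xs.getD m 0) ++ pvGapsDnC (xs.getD m 0) (xs.drop (m + 1)) last
termination_by xs.length
decreasing_by
  · simp only [List.length_take]; omega
  · simp only [List.length_drop]; omega

def set_to_comp_alt (s : List Int) : List Int := pvGapsDnC 0 s 23

-- ===== PRECONDITION & SPEC =====
def Spec_set_to_comp (s : List Int) (out : List Int) : Prop := out = set_to_comp_alt s
instance (s : List Int) (out : List Int) : Decidable (Spec_set_to_comp s out) := by unfold Spec_set_to_comp; infer_instance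

-- ===== CLAIM (what is proved, stated in full; the proofs are below) =====
def Claim_equal_set_to_comp : Prop := ∀ (s : List Int), Dom_set_to_comp s → Spec_set_to_comp s (set_to_comp s)

-- ===== LEMMAS AND PROOFS =====

-- the common characterisation: gaps of the boundary sequence prev, xs..., last
def pvGapsW (prev : Int) (xs : List Int) (last : Int) : List Int :=
  match xs with
  | [] => [last - prev]
  | x :: rest => (x - prev) :: pvGapsW x rest last

theorem pvGapsW_append (l1 : List Int) : ∀ (prev x last : Int) (l2 : List Int),
    pvGapsW prev (l1 ++ x :: l2) last = pvGapsW prev l1 x ++ pvGapsW x l2 last := by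
  induction l1 with
  | nil => intro prev x last l2; simp [pvGapsW]
  | cons y ys ih => intro prev x last l2; simp [pvGapsW, ih]

theorem pvDnC_eq_gapsW (n : ℕ) : ∀ (xs : List Int), xs.length ≤ n → ∀ (prev last : Int),
    pvGapsDnC prev xs last = pvGapsW prev xs last := by
  induction n with
  | zero =>
    intro xs hn prev last
    have : xs = [] := List.eq_nil_of_length_eq_zero (by omega)
    subst this; simp [pvGapsDnC, pvGapsW]
  | succ n ih =>
    intro xs hn prev last
    cases hxs : xs with
    | nil => simp [pvGapsDnC, pvGapsW]
    | cons x rest =>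
      subst hxs
      rw [pvGapsDnC]
      have hlen : 0 < (x :: rest).length := by simp
      simp only [if_neg (by omega : ¬ (x :: rest).length = 0)]
      set xs := x :: rest
      set m := xs.length / 2 with hm
      have hmlt : m < xs.length := by omega
      have hsplit : xs = xs.take m ++ xs.getD m 0 :: xs.drop (m + 1) := by
        rw [List.getD_eq_getElem xs 0 hmlt]
        conv_lhs => rw [← List.take_append_drop m xs]
        rw [← List.getElem_cons_drop hmlt]
      rw [ih (xs.take m) (by simp [List.length_take]; omega) prev (xs.getD m 0),
          ih (xs.drop (m + 1)) (by simp [List.length_drop]; omega) (xs.getD m 0) last,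
          ← pvGapsW_append]
      exact congrArg (fun l => pvGapsW prev l last) hsplit.symm


theorem pvLoopA (s : List Int) : ∀ (k j : ℕ), s.length - j = k → (hj : j < s.length) →
    ∀ (acc : List Int) (first : Int),
      ((PySem.List.pyRange (j : Int) (s.length : Int) 1).foldl (pvStepA s)
        (acc, first, s.getD j 0)).1 = acc ++ pvGapsW first (s.drop j) 23 := by
  intro k
  induction k with
  | zero => intro j hk hj; omega
  | succ k ih =>
    intro j hk hj acc first
    rw [PySem.List.pyRange_one_cons (by exact_mod_cast hj)]
    have hdrop : s.drop j = s.getD j 0 :: s.drop (j + 1) := by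
      rw [List.getD_eq_getElem s 0 hj]
      exact (List.getElem_cons_drop hj).symm
    by_cases hlt : j + 1 < s.length
    · have hget : PySem.List.pyGet? s ((j : Int) + 1) = some (s.getD (j + 1) 0) := by
        have : ((j : Int) + 1) = ((j + 1 : ℕ) : Int) := by push_cast; ring
        rw [this, PySem.List.pyGet?_natCast, List.getElem?_eq_getElem hlt,
          List.getD_eq_getElem s 0 hlt]
      rw [List.foldl_cons]
      have hstep : pvStepA s (acc, first, s.getD j 0) (j : Int)
          = (acc ++ [s.getD j 0 - first], s.getD j 0, s.getD (j + 1) 0) := by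
        simp [pvStepA, hget]
      rw [hstep]
      have := ih (j + 1) (by omega) hlt (acc ++ [s.getD j 0 - first]) (s.getD j 0)
      rw [show ((j : Int) + 1) = ((j + 1 : ℕ) : Int) by push_cast; ring, this,
        hdrop, pvGapsW]
      simp
    · have hend : j + 1 = s.length := by omega
      have hget : PySem.List.pyGet? s ((j : Int) + 1) = none := by
        have : ((j : Int) + 1) = ((j + 1 : ℕ) : Int) := by push_cast; ring
        rw [this, PySem.List.pyGet?_natCast, List.getElem?_eq_none (by omega)]
      rw [List.foldl_cons]
      have hstep : pvStepA s (acc, first, s.getD j 0) (j : Int)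
          = (acc ++ [s.getD j 0 - first] ++ [23 - s.getD j 0], s.getD j 0, s.getD j 0) := by
        simp [pvStepA, hget]
      rw [hstep, PySem.List.pyRange_one_eq_nil (by omega)]
      have hdrop1 : s.drop (j + 1) = [] := by
        simp [hend]
      rw [hdrop, hdrop1]
      simp [pvGapsW]

-- ===== VERDICT (by name: the statement is the Claim_ definition above) =====
theorem set_to_comp_spec : Claim_equal_set_to_comp := by
  intro s _
  unfold Spec_set_to_comp set_to_comp_alt
  rw [pvDnC_eq_gapsW s.length s le_rfl]
  cases s with
  | nil => simp [set_to_comp, pvGapsW]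
  | cons x xs =>
    have h0 : (0 : ℕ) < (x :: xs).length := by simp
    have := pvLoopA (x :: xs) (x :: xs).length 0 (by omega) h0 [] 0
    simpa [set_to_comp] using this
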